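-- pv_equiv track=rewrite | github.com/ihahalev/goit-pnc-hw-02 | 01_vigenere.py | extend_key
-- ===== SOURCE A (Python) =====
-- def extend_key(text, key) -> str:
--     key = list(key)
--     if len(text) <= len(key):
--         return key
--     else:
--         for i in range(len(text) - len(key)):
--             key.append(key[i % len(key)])
--     return ''.join(key)
-- ===== SOURCE B (Python) =====
-- def extend_key(text, key) -> str:
--     key = list(key)
--     if len(text) <= len(key):
--         return key
--     repeat = len(text) // len(key) + 1
--     return ''.join((key * repeat)[:len(text)])
-- ===== Notes on version B (the rewrite author's own statement) =====
-- stated objective: idiomatic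
-- what changed: Replaces the per-character cyclic-append loop with a closed-form multiply-and-slice: repeat the key ceil-many times and truncate to len(text).
-- outside the precondition, e.g. on extend_key('ab', 'xyz'): A returns ['x', 'y', 'z'], B returns ['x', 'y', 'z']
import Mathlib
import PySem

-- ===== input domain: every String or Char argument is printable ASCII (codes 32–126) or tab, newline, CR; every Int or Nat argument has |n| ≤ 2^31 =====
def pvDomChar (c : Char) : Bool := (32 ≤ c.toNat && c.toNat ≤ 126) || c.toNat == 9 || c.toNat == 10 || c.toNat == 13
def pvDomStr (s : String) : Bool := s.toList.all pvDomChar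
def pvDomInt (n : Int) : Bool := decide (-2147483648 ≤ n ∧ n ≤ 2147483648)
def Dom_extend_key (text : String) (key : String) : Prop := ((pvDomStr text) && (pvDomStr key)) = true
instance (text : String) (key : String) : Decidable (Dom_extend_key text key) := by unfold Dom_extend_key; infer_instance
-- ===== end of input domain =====

-- B replaces A's per-character cyclic-append loop by the closed-form "repeat the key
-- len(text)//len(key)+1 times and slice to len(text)" construction (idiomatic, same cost).


-- ===== PORT A =====
-- for i in range(len(text)-len(key)): key.append(key[i % len(key)])  (len(key) is re-read
-- from the growing list each iteration, as in Python); getD ' ' is only reached when the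
-- index is in range, which Pre_ guarantees (empty key would be Python's ZeroDivisionError).
def extend_key (text : String) (key : String) : String :=
  let k0 := key.toList
  if text.toList.length ≤ k0.length then String.mk k0
  else
    String.mk ((List.range (text.toList.length - k0.length)).foldl
      (fun acc i => acc ++ [acc.getD (i % acc.length) ' ']) k0)

-- ===== PORT B =====
-- repeat = len(text) // len(key) + 1; ''.join((key * repeat)[:len(text)])
def extend_key_alt (text : String) (key : String) : String :=
  let k := key.toList
  if text.toList.length ≤ k.length then String.mk k
  else
    let rep := text.toList.length / k.length + 1
    String.mk (((List.replicate rep k).flatten).take text.toList.length)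

-- ===== PRECONDITION & SPEC =====
-- Pre_ excludes: empty key with longer text (both Pythons raise ZeroDivisionError), and
-- len(text) ≤ len(key), where both Pythons return list(key) — a list, not a value of the
-- declared str return type, so nothing of type String can be claimed there.
def Pre_extend_key (text : String) (key : String) : Prop :=
  0 < key.toList.length ∧ key.toList.length < text.toList.length
instance (text : String) (key : String) : Decidable (Pre_extend_key text key) := by
  unfold Pre_extend_key; infer_instance
def pvWitness_extend_key : String × String := ("attack at dawn", "key")
def Spec_extend_key (text : String) (key : String) (out : String) : Prop := out = extend_key_alt text key
instance (text : String) (key : String) (out : String) : Decidable (Spec_extend_key text key out) := by unfold Spec_extend_key; infer_instance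

-- ===== CLAIM (what is proved, stated in full; the proofs are below) =====
def Claim_equal_extend_key : Prop := ∀ (text : String) (key : String), Dom_extend_key text key → Pre_extend_key text key → Spec_extend_key text key (extend_key text key)

-- ===== LEMMAS AND PROOFS =====

-- the ideal cyclic extension of k0, position by position
def pvCyc (k0 : List Char) (p : Nat) : Char := k0.getD (p % k0.length) ' '

theorem pvCyc_add (k0 : List Char) (p : Nat) : pvCyc k0 (p + k0.length) = pvCyc k0 p := by
  simp [pvCyc, Nat.add_mod_right]

theorem pvCyc_self (k0 : List Char) (_h : 0 < k0.length) :
    (List.range k0.length).map (pvCyc k0) = k0 := by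
  apply List.ext_getElem
  · simp
  · intro i h1 h2
    simp at h1
    simp [pvCyc, Nat.mod_eq_of_lt h1, List.getD, List.getElem?_eq_getElem h1]

-- A's fold builds exactly the first L0+n values of pvCyc
theorem pvFoldA (k0 : List Char) (hk : 0 < k0.length) (n : Nat) :
    (List.range n).foldl (fun acc i => acc ++ [acc.getD (i % acc.length) ' ']) k0
      = (List.range (k0.length + n)).map (pvCyc k0) := by
  induction n with
  | zero => simpa using (pvCyc_self k0 hk).symm
  | succ n ih =>
      rw [List.range_succ, List.foldl_append, ih]
      have hlen : ((List.range (k0.length + n)).map (pvCyc k0)).length = k0.length + n := by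
        simp
      have hlt : n < k0.length + n := by omega
      have hmod : n % (k0.length + n) = n := Nat.mod_eq_of_lt hlt
      have hget : ((List.range (k0.length + n)).map (pvCyc k0)).getD n ' ' = pvCyc k0 n := by
        rw [List.getD, List.getElem?_eq_getElem (by simpa using hlt)]
        simp
      simp only [List.foldl_cons, List.foldl_nil, hlen, hmod, hget]
      rw [show k0.length + (n + 1) = (k0.length + n) + 1 by omega, List.range_succ,
        List.map_append]
      simp [show k0.length + n = n + k0.length by omega, pvCyc_add]

-- the flattened replication is the first r*L0 values of pvCyc
theorem pvFlatRep (k0 : List Char) (hk : 0 < k0.length) (r : Nat) :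
    (List.replicate r k0).flatten = (List.range (r * k0.length)).map (pvCyc k0) := by
  induction r with
  | zero => simp
  | succ r ih =>
      have : List.replicate (r + 1) k0 = List.replicate r k0 ++ [k0] := by
        simp [List.replicate_succ' ]
      rw [this, List.flatten_append, ih]
      rw [show (r + 1) * k0.length = r * k0.length + k0.length by ring, List.range_add,
        List.map_append]
      have hcomp : List.map (pvCyc k0 ∘ fun x => r * k0.length + x) (List.range k0.length)
          = k0 := by
        apply (List.map_congr_left ?_).trans (pvCyc_self k0 hk)
        intro a _
        simp [Function.comp, pvCyc, Nat.add_comm (r * k0.length) a]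
      rw [List.map_map, hcomp]
      simp

-- ===== VERDICT (by name: the statement is the Claim_ definition above) =====
theorem extend_key_spec : Claim_equal_extend_key := by
  intro text key _ hpre
  obtain ⟨hk, hlt⟩ := hpre
  unfold Spec_extend_key extend_key extend_key_alt
  simp only
  rw [if_neg (by omega), if_neg (by omega)]
  set T := text.toList.length with hT
  set k0 := key.toList with hk0
  rw [pvFoldA k0 hk (T - k0.length), pvFlatRep k0 hk (T / k0.length + 1)]
  rw [← List.map_take, List.take_range]
  have hge : T ≤ (T / k0.length + 1) * k0.length := by
    have := Nat.div_add_mod T k0.length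
    have := Nat.mod_lt T hk
    nlinarith
  congr 2
  have h2 : k0.length + (T - k0.length) = T := by omega
  rw [h2, Nat.min_eq_left hge]
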